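-- pv_equiv track=rewrite | github.com/tony9402/baekjoon | solution/implementation/21611/main.py | blizard
-- ===== SOURCE A (Python) =====
-- def blizard(n):
--     #서남동북 방향으로 블리자드 발동 시
--     #지워지는 구슬 번호 저장
--     num = n//2
--     lst = [[], [], [], []]
--
--     pos = 0
--     cnt = 0
--     for i in range(num):
--         cnt += 1
--         pos += cnt
--         lst[0].append(pos)
--         cnt += 1
--         for j in range(1, 4):
--             pos += cnt
--             lst[j].append(pos)
--
--     return lst
-- ===== SOURCE B (Python) =====
-- def blizard(n):
--     # Closed form: element i of list j is 4*i*i + (5+2*j)*i + (1+2*j)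
--     num = n // 2
--     return [[4*i*i + (5 + 2*j)*i + (1 + 2*j) for i in range(num)] for j in range(4)]
-- ===== Notes on version B (the rewrite author's own statement) =====
-- stated objective: simpler
-- what changed: Replaced the stateful pos/cnt accumulating loop by a closed-form comprehension computing each position independently as 4*i*i+(5+2*j)*i+(1+2*j).
import Mathlib
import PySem

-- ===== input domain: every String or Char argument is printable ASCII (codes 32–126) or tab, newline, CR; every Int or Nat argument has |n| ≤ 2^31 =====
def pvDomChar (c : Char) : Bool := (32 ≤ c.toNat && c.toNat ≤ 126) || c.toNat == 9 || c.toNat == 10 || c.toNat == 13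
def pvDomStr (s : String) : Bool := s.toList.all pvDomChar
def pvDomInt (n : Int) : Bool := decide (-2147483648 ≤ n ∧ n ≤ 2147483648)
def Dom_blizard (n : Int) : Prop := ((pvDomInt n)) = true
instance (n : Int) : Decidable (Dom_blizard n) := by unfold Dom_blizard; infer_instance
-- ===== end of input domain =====

-- B replaces A's stateful pos/cnt accumulating loop by a closed-form comprehension (simpler).

-- ===== PORT A =====
-- one outer-loop body: cnt+=1; pos+=cnt; lst[0].append(pos); cnt+=1; inner loop j=1..3
-- (lst[j] with j ∈ {1,2,3}: nonnegative index, so .toNat is exact here)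
def blizardStep (st : Int × Int × List (List Int)) (_i : Int) : Int × Int × List (List Int) :=
  let cnt := st.2.1 + 1
  let pos := st.1 + cnt
  let lst := st.2.2.modify 0 (· ++ [pos])
  let cnt := cnt + 1
  let inner := (PySem.List.pyRange 1 4 1).foldl
    (fun (pl : Int × List (List Int)) j =>
      (pl.1 + cnt, pl.2.modify j.toNat (· ++ [pl.1 + cnt]))) (pos, lst)
  (inner.1, cnt, inner.2)

def blizard (n : Int) : List (List Int) :=
  ((PySem.List.pyRange 0 (PySem.Int.floordiv n 2) 1).foldl blizardStep
    (0, 0, [[], [], [], []])).2.2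

-- ===== PORT B =====
def blizard_alt (n : Int) : List (List Int) :=
  (PySem.List.pyRange 0 4 1).map (fun j =>
    (PySem.List.pyRange 0 (PySem.Int.floordiv n 2) 1).map
      (fun i => 4*i*i + (5 + 2*j)*i + (1 + 2*j)))

-- ===== PRECONDITION & SPEC =====
def Spec_blizard (n : Int) (out : List (List Int)) : Prop := out = blizard_alt n
instance (n : Int) (out : List (List Int)) : Decidable (Spec_blizard n out) := by unfold Spec_blizard; infer_instance

-- ===== CLAIM (what is proved, stated in full; the proofs are below) =====
def Claim_equal_blizard : Prop := ∀ (n : Int), Dom_blizard n → Spec_blizard n (blizard n)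

-- ===== LEMMAS AND PROOFS =====

def gblz (j : Int) (m : Int) : List Int :=
  (PySem.List.pyRange 0 m 1).map (fun i => 4*i*i + (5 + 2*j)*i + (1 + 2*j))

lemma gblz_succ (j : Int) (m : Nat) :
    gblz j ((m : Int) + 1) = gblz j (m : Int) ++ [4*(m:Int)*m + (5 + 2*j)*m + (1 + 2*j)] := by
  simp [gblz, PySem.List.pyRange_one_succ_right (show (0:Int) ≤ m by positivity)]

lemma blizard_loop (m : Nat) :
    (PySem.List.pyRange 0 (m : Int) 1).foldl blizardStep (0, 0, [[], [], [], []]) =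
      (4*(m:Int)*m + 3*m, 2*(m:Int), [gblz 0 m, gblz 1 m, gblz 2 m, gblz 3 m]) := by
  induction m with
  | zero => simp [PySem.List.pyRange_one_eq_nil, gblz]
  | succ m ih =>
    have h : (PySem.List.pyRange 0 ((m:Int)+1) 1) =
        PySem.List.pyRange 0 (m:Int) 1 ++ [(m:Int)] :=
      PySem.List.pyRange_one_succ_right (by positivity)
    have h14 : PySem.List.pyRange 1 4 1 = [1, 2, 3] := by decide
    push_cast
    rw [h, List.foldl_append, ih]
    simp only [List.foldl, blizardStep, h14, gblz_succ, List.modify]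
    norm_num [show Int.toNat 2 = 2 from rfl, show Int.toNat 3 = 3 from rfl,
      List.modifyTailIdx, List.modifyHead]
    ring_nf
    simp [List.modifyTailIdx.go]

theorem blizard_spec : Claim_equal_blizard := by
  intro n _
  unfold Spec_blizard blizard blizard_alt
  rw [show PySem.List.pyRange 0 4 1 = [0, 1, 2, 3] from by decide]
  obtain h | h := le_or_gt (PySem.Int.floordiv n 2) 0
  · rw [PySem.List.pyRange_one_eq_nil h]; rfl
  · obtain ⟨m, hm⟩ : ∃ m : Nat, (m : Int) = PySem.Int.floordiv n 2 :=
      ⟨_, Int.toNat_of_nonneg h.le⟩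
    rw [← hm, blizard_loop]
    norm_num [gblz]
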